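-- pv_equiv track=rewrite | github.com/yamsyamsyams/Python | Smarties_Counter.py | count_smarties
-- ===== SOURCE A (Python) =====
-- def count_smarties(smarties):
--     red = 0
--     green = 0
--     blue = 0
--     yellow = 0
--     orange = 0
--     brown = 0
--     for j in smarties:
--         if j == "red":
--             red += 1
--         elif j == "green":
--             green += 1
--         elif j == "blue":
--             blue += 1
--         elif j == "yellow":
--             yellow += 1
--         elif j == "orange":
--             orange += 1
--         else:
--             brown += 1
--     my_string = "red: %s green: %s blue: %s yellow: %s orange: %s brown: %s" % (red, green, blue, yellow, orange, brown)
--     return my_string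
-- ===== SOURCE B (Python) =====
-- def count_smarties(smarties):
--     red = smarties.count("red")
--     green = smarties.count("green")
--     blue = smarties.count("blue")
--     yellow = smarties.count("yellow")
--     orange = smarties.count("orange")
--     brown = len(smarties) - (red + green + blue + yellow + orange)
--     return "red: %s green: %s blue: %s yellow: %s orange: %s brown: %s" % (red, green, blue, yellow, orange, brown)
-- ===== Notes on version B (the rewrite author's own statement) =====
-- stated objective: idiomatic
-- what changed: Replaces the six-way if/elif accumulator loop by built-in list.count for each named color and computes brown as the catch-all by subtraction from len(smarties), removing the else branch entirely.
import Mathlib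
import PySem

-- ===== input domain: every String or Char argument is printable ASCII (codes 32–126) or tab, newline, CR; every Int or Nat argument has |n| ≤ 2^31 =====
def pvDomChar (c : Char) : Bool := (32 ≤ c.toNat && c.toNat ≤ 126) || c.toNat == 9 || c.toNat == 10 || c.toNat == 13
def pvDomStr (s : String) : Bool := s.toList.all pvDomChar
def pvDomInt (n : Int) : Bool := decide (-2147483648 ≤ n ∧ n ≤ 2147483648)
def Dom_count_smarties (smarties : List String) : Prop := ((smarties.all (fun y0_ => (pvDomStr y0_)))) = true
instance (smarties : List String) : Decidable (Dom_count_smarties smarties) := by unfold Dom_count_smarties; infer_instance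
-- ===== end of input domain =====

-- B replaces A's six-way if/elif accumulator loop by built-in counts of the five named
-- colors plus brown as len minus their sum (objective: idiomatic; same O(n) cost).

-- ===== PORT A =====
-- the shared final formatting line, identical in both Pythons:
-- "red: %s green: %s blue: %s yellow: %s orange: %s brown: %s" % (red, green, blue, yellow, orange, brown)
def smartiesFmt (red green blue yellow orange brown : Int) : String :=
  "red: " ++ PySem.Int.toStr red ++ " green: " ++ PySem.Int.toStr green ++
  " blue: " ++ PySem.Int.toStr blue ++ " yellow: " ++ PySem.Int.toStr yellow ++
  " orange: " ++ PySem.Int.toStr orange ++ " brown: " ++ PySem.Int.toStr brown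

-- A's loop body: the if/elif/else chain updating the six counters
def smartiesStep (s : Int × Int × Int × Int × Int × Int) (j : String) :
    Int × Int × Int × Int × Int × Int :=
  if j = "red" then (s.1 + 1, s.2.1, s.2.2.1, s.2.2.2.1, s.2.2.2.2.1, s.2.2.2.2.2)
  else if j = "green" then (s.1, s.2.1 + 1, s.2.2.1, s.2.2.2.1, s.2.2.2.2.1, s.2.2.2.2.2)
  else if j = "blue" then (s.1, s.2.1, s.2.2.1 + 1, s.2.2.2.1, s.2.2.2.2.1, s.2.2.2.2.2)
  else if j = "yellow" then (s.1, s.2.1, s.2.2.1, s.2.2.2.1 + 1, s.2.2.2.2.1, s.2.2.2.2.2)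
  else if j = "orange" then (s.1, s.2.1, s.2.2.1, s.2.2.2.1, s.2.2.2.2.1 + 1, s.2.2.2.2.2)
  else (s.1, s.2.1, s.2.2.1, s.2.2.2.1, s.2.2.2.2.1, s.2.2.2.2.2 + 1)

def count_smarties (smarties : List String) : String :=
  let s := smarties.foldl smartiesStep (0, 0, 0, 0, 0, 0)
  smartiesFmt s.1 s.2.1 s.2.2.1 s.2.2.2.1 s.2.2.2.2.1 s.2.2.2.2.2

-- ===== PORT B =====
def count_smarties_alt (smarties : List String) : String :=
  let red : Int := PySem.List.count smarties "red"
  let green : Int := PySem.List.count smarties "green"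
  let blue : Int := PySem.List.count smarties "blue"
  let yellow : Int := PySem.List.count smarties "yellow"
  let orange : Int := PySem.List.count smarties "orange"
  let brown : Int := (smarties.length : Int) - (red + green + blue + yellow + orange)
  smartiesFmt red green blue yellow orange brown

-- ===== PRECONDITION & SPEC =====
def Spec_count_smarties (smarties : List String) (out : String) : Prop := out = count_smarties_alt smarties
instance (smarties : List String) (out : String) : Decidable (Spec_count_smarties smarties out) := by unfold Spec_count_smarties; infer_instance

-- ===== CLAIM (what is proved, stated in full; the proofs are below) =====
def Claim_equal_count_smarties : Prop := ∀ (smarties : List String), Dom_count_smarties smarties → Spec_count_smarties smarties (count_smarties smarties)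

-- ===== LEMMAS AND PROOFS =====

-- invariant of A's loop: each accumulator advances by the corresponding count,
-- and the else branch advances brown by length minus the five named counts
theorem smarties_foldl_eq (xs : List String) :
    ∀ r g b y o br : Int,
    xs.foldl smartiesStep (r, g, b, y, o, br) =
      (r + xs.count "red", g + xs.count "green", b + xs.count "blue",
       y + xs.count "yellow", o + xs.count "orange",
       br + ((xs.length : Int) - (xs.count "red" + xs.count "green" + xs.count "blue"
             + xs.count "yellow" + xs.count "orange"))) := by
  induction xs with
  | nil => intro r g b y o br; simp
  | cons hd tl ih =>
      intro r g b y o br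
      simp only [List.foldl_cons, smartiesStep, List.count_cons, List.length_cons]
      by_cases h1 : hd = "red" <;> by_cases h2 : hd = "green" <;>
        by_cases h3 : hd = "blue" <;> by_cases h4 : hd = "yellow" <;>
        by_cases h5 : hd = "orange" <;>
        simp_all [Prod.ext_iff] <;> omega

-- ===== VERDICT (by name: the statement is the Claim_ definition above) =====
theorem count_smarties_spec : Claim_equal_count_smarties := by
  intro smarties _
  unfold Spec_count_smarties count_smarties count_smarties_alt
  simp only [smarties_foldl_eq, PySem.List.count_eq]
  norm_num
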